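-- pv_equiv track=rewrite | github.com/zee-ge3/cfr-poker-bot | compare_bots.py | detect_autofolding
-- ===== SOURCE A (Python) =====
-- from collections import defaultdict
--
-- def detect_autofolding(rows, geoz_slot):
--     """Detect if autofolding occurred at end of match.
--     Returns True if the last 20+ hands show geoz folding every hand.
--     """
--     hands = defaultdict(list)
--     for row in rows:
--         h = int(row["hand_number"])
--         hands[h].append(row)
--
--     sorted_hands = sorted(hands.keys(), reverse=True)
--     consecutive_folds = 0
--
--     for h_num in sorted_hands:
--         hand_rows = hands[h_num]
--         geoz_actions = [r for r in hand_rows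
--                         if int(r.get("active_team", -1)) == geoz_slot
--                         and r.get("action_type") not in ("DISCARD", None, "")]
--         if geoz_actions:
--             # Check if geoz's first (and possibly only) action is FOLD
--             first_action = geoz_actions[0].get("action_type")
--             if first_action == "FOLD":
--                 consecutive_folds += 1
--             else:
--                 break
--         else:
--             break
--
--     return consecutive_folds >= 20
-- ===== SOURCE B (Python) =====
-- def detect_autofolding(rows, geoz_slot):
--     """Detect if autofolding occurred at end of match.
--     Single pass: record per hand whether geoz's first filtered action is FOLD,
--     then count distinct hands above the highest 'break' hand."""
--     status = {}
--     hands = set()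
--     for row in rows:
--         h = int(row["hand_number"])
--         hands.add(h)
--         if h not in status:
--             act = row.get("action_type")
--             if int(row.get("active_team", -1)) == geoz_slot and act not in ("DISCARD", None, ""):
--                 status[h] = (act == "FOLD")
--     breaks = {h for h in hands if not status.get(h, False)}
--     if breaks:
--         t = max(breaks)
--         count = sum(1 for h in hands if h > t)
--     else:
--         count = len(hands)
--     return count >= 20
-- ===== Notes on version B (the rewrite author's own statement) =====
-- stated objective: alternative
-- what changed: Instead of grouping rows per hand, sorting hands descending and break-scanning for consecutive folds, B makes one pass keeping only each hand's first filtered action as a boolean status, then counts distinct hands strictly above the maximum 'break' hand (or all hands if none) and compares with 20.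
import Mathlib
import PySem

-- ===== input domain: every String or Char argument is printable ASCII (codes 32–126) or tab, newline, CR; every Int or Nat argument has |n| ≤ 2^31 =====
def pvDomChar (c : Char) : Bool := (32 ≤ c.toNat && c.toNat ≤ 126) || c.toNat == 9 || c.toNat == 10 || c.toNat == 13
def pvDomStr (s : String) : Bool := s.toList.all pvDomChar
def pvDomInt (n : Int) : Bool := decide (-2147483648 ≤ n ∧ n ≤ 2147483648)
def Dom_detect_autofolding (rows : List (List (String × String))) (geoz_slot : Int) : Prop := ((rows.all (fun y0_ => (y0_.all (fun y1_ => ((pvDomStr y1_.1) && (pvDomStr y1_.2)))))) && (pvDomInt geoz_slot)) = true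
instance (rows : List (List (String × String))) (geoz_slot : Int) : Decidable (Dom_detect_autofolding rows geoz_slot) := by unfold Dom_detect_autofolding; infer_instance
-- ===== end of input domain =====

-- B replaces A's group/sort/descending-break-scan by a single pass that keeps each hand's
-- first filtered action as a boolean status, then counts distinct hands above the maximum
-- 'break' hand (alternative decomposition; return-value equivalence proved under Pre_).

-- shared transliterations of the row-level expressions both Pythons use
def handNum (row : List (String × String)) : Int :=
  (((PySem.Dict.mk row).get? "hand_number").bind PySem.Int.ofStr?).getD 0

def activeTeam (row : List (String × String)) : Int :=
  match (PySem.Dict.mk row).get? "active_team" with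
  | none => -1
  | some s => (PySem.Int.ofStr? s).getD 0

def rowPred (slot : Int) (row : List (String × String)) : Bool :=
  (activeTeam row == slot) &&
    (match (PySem.Dict.mk row).get? "action_type" with
     | none => false
     | some s => !(s == "DISCARD") && !(s == ""))

def isFold (row : List (String × String)) : Bool :=
  (PySem.Dict.mk row).get? "action_type" == some "FOLD"

-- ===== PORT A =====
def aLoop (hands : PySem.Dict Int (List (List (String × String)))) (slot : Int) :
    List Int → Int → Int
  | [], acc => acc
  | h :: t, acc =>
    let geoz_actions := (hands.getD h []).filter (rowPred slot)
    match geoz_actions with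
    | [] => acc
    | r :: _ => if isFold r then aLoop hands slot t (acc + 1) else acc

def detect_autofolding (rows : List (List (String × String))) (geoz_slot : Int) : Bool :=
  let hands := rows.foldl (fun d row => d.modify (handNum row) [] (fun l => l ++ [row])) PySem.Dict.empty
  let sorted_hands := PySem.List.sorted hands.keys (fun x => x) true
  decide (20 ≤ aLoop hands geoz_slot sorted_hands 0)

-- ===== PORT B =====
def bStep (slot : Int) (acc : PySem.Dict Int Bool × PySem.Set Int)
    (row : List (String × String)) : PySem.Dict Int Bool × PySem.Set Int :=
  let h := handNum row
  let hs := PySem.Set.add acc.2 h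
  let st := if acc.1.contains h then acc.1
            else if rowPred slot row then acc.1.insert h (isFold row) else acc.1
  (st, hs)

def detect_autofolding_alt (rows : List (List (String × String))) (geoz_slot : Int) : Bool :=
  let scan := rows.foldl (bStep geoz_slot) (PySem.Dict.empty, PySem.Set.empty)
  let breaks := scan.2.filter (fun h => !(scan.1.getD h false))
  let count : Int :=
    match PySem.List.max? breaks (fun x => x) with
    | some t => ((scan.2.filter (fun h => decide (t < h))).length : Int)
    | none => (scan.2.length : Int)
  decide (20 ≤ count)

-- ===== PRECONDITION & SPEC =====
def rowOK (row : List (String × String)) : Bool :=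
  (((PySem.Dict.mk row).get? "hand_number").bind PySem.Int.ofStr?).isSome &&
  (match (PySem.Dict.mk row).get? "active_team" with
   | none => true
   | some s => (PySem.Int.ofStr? s).isSome)

-- Pre_ excludes inputs where int(...) raises ValueError / KeyError on some row: it requires every
-- row to carry an int-parseable "hand_number" and an int-parseable "active_team" when present.
-- This also excludes some inputs where A still returns (its break-scan can stop before ever
-- reaching a malformed row), on which B's single pass raises.
def Pre_detect_autofolding (rows : List (List (String × String))) (geoz_slot : Int) : Prop :=
  rows.all rowOK = true
instance (rows : List (List (String × String))) (geoz_slot : Int) : Decidable (Pre_detect_autofolding rows geoz_slot) := by unfold Pre_detect_autofolding; infer_instance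

def pvWitness_detect_autofolding : (List (List (String × String))) × Int :=
  ([[("hand_number", "1"), ("active_team", "0"), ("action_type", "FOLD")],
    [("hand_number", "2"), ("active_team", "0"), ("action_type", "CALL")]], 0)

def Spec_detect_autofolding (rows : List (List (String × String))) (geoz_slot : Int) (out : Bool) : Prop := out = detect_autofolding_alt rows geoz_slot
instance (rows : List (List (String × String))) (geoz_slot : Int) (out : Bool) : Decidable (Spec_detect_autofolding rows geoz_slot out) := by unfold Spec_detect_autofolding; infer_instance

-- ===== CLAIM (what is proved, stated in full; the proofs are below) =====
def Claim_equal_detect_autofolding : Prop := ∀ (rows : List (List (String × String))) (geoz_slot : Int), Dom_detect_autofolding rows geoz_slot → Pre_detect_autofolding rows geoz_slot → Spec_detect_autofolding rows geoz_slot (detect_autofolding rows geoz_slot)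

-- ===== LEMMAS AND PROOFS =====

-- the common per-hand status: is geoz's first filtered action in hand h a FOLD?
def statusOf (slot : Int) (rows : List (List (String × String))) (h : Int) : Bool :=
  (((rows.filter (fun r => handNum r == h && rowPred slot r)).head?).map isFold).getD false

-- A's grouping dict holds, per hand, the rows of that hand in order
lemma group_getD (rows : List (List (String × String))) (h : Int) :
    ((rows.foldl (fun d row => d.modify (handNum row) [] (fun l => l ++ [row])) PySem.Dict.empty).getD h [])
      = rows.filter (fun r => handNum r == h) := by
  have h1 := PySem.Dict.getD_foldl_modify_append (rows.map (fun r => (handNum r, r)))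
      (PySem.Dict.empty : PySem.Dict Int (List (List (String × String)))) h
  rw [List.foldl_map] at h1
  simpa [PySem.Dict.getD_empty, List.filter_map, Function.comp_def] using h1

lemma group_keys (rows : List (List (String × String))) :
    ((rows.foldl (fun d row => d.modify (handNum row) [] (fun l => l ++ [row])) PySem.Dict.empty).keys)
      = PySem.Set.ofList (rows.map handNum) := by
  have h1 := PySem.Dict.keys_foldl_modify_key rows handNum ([] : List (List (String × String)))
      (fun _ row l => l ++ [row]) PySem.Dict.empty
  rw [h1]
  simp [PySem.Dict.keys_empty, PySem.Set.update_eq_append_filter, PySem.Set.contains]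

lemma filterA (rows : List (List (String × String))) (slot h) :
    (rows.filter (fun r => handNum r == h)).filter (rowPred slot)
      = rows.filter (fun r => handNum r == h && rowPred slot r) := by
  rw [List.filter_filter]
  exact List.filter_congr (fun a _ => by rw [Bool.and_comm])

-- A's break loop counts the takeWhile-prefix of true statuses
lemma aLoop_eq (rows : List (List (String × String))) (slot : Int) :
    ∀ (S : List Int) (acc : Int),
      aLoop (rows.foldl (fun d row => d.modify (handNum row) [] (fun l => l ++ [row])) PySem.Dict.empty) slot S acc
        = acc + ((S.takeWhile (statusOf slot rows)).length : Int) := by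
  intro S
  induction S with
  | nil => intro acc; simp [aLoop]
  | cons h t ih =>
    intro acc
    rw [aLoop]
    simp only [group_getD, filterA]
    cases hga : rows.filter (fun r => handNum r == h && rowPred slot r) with
    | nil =>
      have hst : statusOf slot rows h = false := by simp [statusOf, hga]
      simp [hst]
    | cons r rest =>
      have hst : statusOf slot rows h = isFold r := by simp [statusOf, hga]
      by_cases hf : isFold r = true
      · simp only [hga, ih, List.takeWhile_cons, hst, hf]
        simp
        ring
      · simp only [Bool.not_eq_true] at hf
        simp [hf, List.takeWhile_cons, hst]

-- B's scan: status lookup is the first filtered row of the hand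
lemma bScan_get? (slot : Int) (h : Int) :
    ∀ (rows : List (List (String × String))) (st : PySem.Dict Int Bool) (hs : PySem.Set Int),
      ((rows.foldl (bStep slot) (st, hs)).1).get? h
        = (st.get? h).or ((rows.filter (fun r => handNum r == h && rowPred slot r)).head?.map isFold) := by
  intro rows
  induction rows with
  | nil => intro st hs; simp
  | cons r rest ih =>
    intro st hs
    rw [List.foldl_cons]
    by_cases hkey : handNum r = h
    · subst hkey
      by_cases hcont : st.contains (handNum r) = true
      · have hsome : (st.get? (handNum r)).isSome := by
          rw [← PySem.Dict.contains_eq_isSome_get?]; exact hcont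
        obtain ⟨v, hv⟩ := Option.isSome_iff_exists.mp hsome
        simp [bStep, hcont, ih, hv]
      · have hnone : st.get? (handNum r) = none :=
          (PySem.Dict.get?_eq_none_iff_contains st (handNum r)).mpr (by simpa using hcont)
        by_cases hp : rowPred slot r = true
        · simp [bStep, hcont, hp, ih, hnone, PySem.Dict.get?_insert]
        · simp [bStep, hcont, hp, ih, hnone]
    · have hb : (handNum r == h) = false := by simp [hkey]
      by_cases hcont : st.contains (handNum r) = true
      · simp [bStep, hcont, ih, hb]
      · by_cases hp : rowPred slot r = true
        · simp [bStep, hcont, hp, ih, hb, PySem.Dict.get?_insert, Ne.symm hkey]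
        · simp [bStep, hcont, hp, ih, hb]

lemma bScan_set (slot : Int) :
    ∀ (rows : List (List (String × String))) (st : PySem.Dict Int Bool) (hs : PySem.Set Int),
      (rows.foldl (bStep slot) (st, hs)).2 = PySem.Set.update hs (rows.map handNum) := by
  intro rows
  induction rows with
  | nil => intro st hs; simp [PySem.Set.update]
  | cons r rest ih => intro st hs; simp [bStep, ih, PySem.Set.update]

lemma bStatus (slot : Int) (rows : List (List (String × String))) (h : Int) :
    ((rows.foldl (bStep slot) (PySem.Dict.empty, PySem.Set.empty)).1).getD h false = statusOf slot rows h := by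
  rw [PySem.Dict.getD_eq_get?_getD, bScan_get?]
  simp [statusOf, PySem.Dict.get?_empty]

-- core: on a strictly descending list, the takeWhile-prefix of trues is the part above the max false
lemma core_all (p : Int → Bool) : ∀ (S : List Int), (∀ h ∈ S, p h = true) →
    S.takeWhile p = S := by
  intro S h
  induction S with
  | nil => rfl
  | cons a t ih =>
    rw [List.takeWhile_cons_of_pos (h a (by simp)), ih (fun x hx => h x (by simp [hx]))]

lemma core_max (p : Int → Bool) (t : Int) : ∀ (S : List Int), S.Pairwise (· > ·) →
    t ∈ S → p t = false → (∀ y ∈ S, p y = false → y ≤ t) →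
    (S.takeWhile p).length = (S.filter (fun h => decide (t < h))).length := by
  intro S
  induction S with
  | nil => intro _ hm; simp at hm
  | cons a rest ih =>
    intro hpw hm hpt hbd
    rcases List.mem_cons.mp hm with rfl | hmem
    · rw [List.takeWhile_cons_of_neg (by simp [hpt])]
      have hrest : rest.filter (fun h => decide (t < h)) = [] := by
        apply List.filter_eq_nil_iff.mpr
        intro y hy
        have : t > y := (List.pairwise_cons.mp hpw).1 y hy
        simp; omega
      simp [hrest]
    · have hat : a > t := (List.pairwise_cons.mp hpw).1 t hmem
      have hpa : p a = true := by
        by_contra hc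
        have := hbd a (by simp) (by simpa using hc)
        omega
      rw [List.takeWhile_cons_of_pos hpa]
      have hta : decide (t < a) = true := by simp; omega
      have hfc : List.filter (fun h => decide (t < h)) (a :: rest)
          = a :: rest.filter (fun h => decide (t < h)) := by
        simp [List.filter_cons, hta]
      rw [hfc]
      simp only [List.length_cons]
      rw [ih (List.pairwise_cons.mp hpw).2 hmem hpt
        (fun y hy hpy => hbd y (by simp [hy]) hpy)]

-- ===== VERDICT (by name: the statement is the Claim_ definition above) =====
theorem detect_autofolding_spec : Claim_equal_detect_autofolding := by
  intro rows slot _hdom _hpre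
  unfold Spec_detect_autofolding detect_autofolding detect_autofolding_alt
  simp only [group_keys, bScan_set, bStatus, aLoop_eq]
  have hupd : PySem.Set.update (PySem.Set.empty : PySem.Set Int) (rows.map handNum)
      = PySem.Set.ofList (rows.map handNum) := by
    simp [PySem.Set.update_eq_append_filter, PySem.Set.empty, PySem.Set.contains]
  rw [hupd]
  set p := statusOf slot rows with hp
  set hs := PySem.Set.ofList (rows.map handNum) with hhs
  set S := PySem.List.sorted hs (fun x => x) true with hS
  have hperm : S.Perm hs := PySem.List.sorted_perm hs (fun x => x) true
  have hnd : S.Nodup := (hperm.nodup_iff).mpr (PySem.Set.nodup_ofList _)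
  have hpw : S.Pairwise (· > ·) := by
    have h1 : S.Pairwise (fun a b => b ≤ a) := PySem.List.sorted_pairwise_rev hs (fun x => x)
    exact (h1.and hnd).imp (fun {a b} hab => lt_of_le_of_ne hab.1 (Ne.symm hab.2))
  cases hmax : PySem.List.max? (hs.filter (fun h => !p h)) (fun x => x) with
  | none =>
    have hnil : hs.filter (fun h => !p h) = [] :=
      (PySem.List.max?_eq_none_iff _ _).mp hmax
    have hall : ∀ h ∈ S, p h = true := by
      intro h hh
      have hh' : h ∈ hs := hperm.mem_iff.mp hh
      by_contra hc
      have : h ∈ hs.filter (fun h => !p h) :=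
        List.mem_filter.mpr ⟨hh', by simpa using hc⟩
      simp [hnil] at this
    rw [core_all p S hall]
    have := hperm.length_eq
    simp [this]
  | some t =>
    have htmem := PySem.List.max?_mem hmax
    have ht1 : t ∈ hs := (List.mem_filter.mp htmem).1
    have ht2 : p t = false := by
      have := (List.mem_filter.mp htmem).2; simpa using this
    have hbd : ∀ y ∈ S, p y = false → y ≤ t := by
      intro y hy hpy
      exact PySem.List.max?_isMax hmax y
        (List.mem_filter.mpr ⟨hperm.mem_iff.mp hy, by simp [hpy]⟩)
    have htS : t ∈ S := hperm.mem_iff.mpr ht1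
    rw [core_max p t S hpw htS ht2 hbd]
    have hlen : (S.filter (fun h => decide (t < h))).length
        = (hs.filter (fun h => decide (t < h))).length :=
      (hperm.filter _).length_eq
    simp [hlen]
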